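-- pv_equiv track=rewrite | github.com/Green1407/Scraping_QIS_Frankfurt | Database.py | lecturer_format_name
-- ===== SOURCE A (Python) =====
-- def lecturer_format_name(name: str) -> str:
--     """
--     Formats a lecturer's name by rearranging name components split by '< '.
--
--     Parameters:
--     name (str): The original name string containing '< ' as a separator.
--
--     Returns:
--     str: The formatted name with components rearranged. In the original .csv the names are in the wrong order, so
--     the single name components need to be rerranged
--     """
--     # Split the name at occurrences of '< ' to separate different parts
--     parts = name.split("< ")
--
--     # Remove any leading or trailing whitespace from each part
--     parts = [p.strip() for p in parts]
--
--     # Rearrange the name components based on the number of parts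
--     if len(parts) > 2:
--         # If there are more than two parts, assume the format: "LastName < FirstName < Title"
--         result_name = parts[2] + " " + parts[1] + " " + parts[0]
--     elif len(parts) > 1:
--         # If there are exactly two parts, assume the format: "LastName < FirstName"
--         result_name = parts[1] + " " + parts[0]
--     else:
--         # If only one part exists, return it as is
--         result_name = parts[0]
--     return result_name
-- ===== SOURCE B (Python) =====
-- def lecturer_format_name(name: str) -> str:
--     # Streaming rewrite: instead of splitting the whole string into a list and
--     # case-analysing its length, scan left to right with str.find, peeling off
--     # at most three components and prepending each stripped piece to the result.
--     result = ""
--     rest = name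
--     for count in range(3):
--         i = rest.find("< ")
--         piece = (rest if i < 0 else rest[:i]).strip()
--         result = piece if count == 0 else piece + " " + result
--         if i < 0:
--             break
--         rest = rest[i + 2:]
--     return result
-- ===== Notes on version B (the rewrite author's own statement) =====
-- stated objective: alternative
-- what changed: Instead of splitting the whole string into a list of parts and case-analysing its length (1, 2, or 3+), B scans the string left to right with str.find, peeling off at most three components by slicing and prepending each stripped piece to an accumulator, never materialising the list of parts.
import Mathlib
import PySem

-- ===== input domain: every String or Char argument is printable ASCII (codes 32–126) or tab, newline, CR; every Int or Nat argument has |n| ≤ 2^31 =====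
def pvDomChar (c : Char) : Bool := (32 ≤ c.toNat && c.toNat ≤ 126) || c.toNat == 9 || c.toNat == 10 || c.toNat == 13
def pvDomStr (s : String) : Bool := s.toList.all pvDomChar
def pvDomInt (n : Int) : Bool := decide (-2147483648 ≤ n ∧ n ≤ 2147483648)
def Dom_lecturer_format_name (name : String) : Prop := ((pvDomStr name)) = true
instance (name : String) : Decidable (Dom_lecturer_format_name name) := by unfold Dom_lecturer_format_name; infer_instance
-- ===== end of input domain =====

-- B replaces A's split-into-a-list plus three-way length case analysis by a single
-- streaming scan: find the next "< " with str.find, slice the piece off, prepend it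
-- to the accumulator (at most three pieces); an 'alternative' decomposition, not faster.

-- ===== PORT A =====
-- literal transliteration of A: split at "< ", strip each part, then a three-way
-- if/elif/else on the number of parts rearranging them with '+'.
def lecturer_format_name (name : String) : String :=
  let parts := (PySem.Str.split? name "< ").getD []  -- sep "< " ≠ "", so split? is always some
  let parts := parts.map PySem.Str.strip
  if parts.length > 2 then
    parts.getD 2 "" ++ " " ++ parts.getD 1 "" ++ " " ++ parts.getD 0 ""
  else if parts.length > 1 then
    parts.getD 1 "" ++ " " ++ parts.getD 0 ""
  else
    parts.getD 0 ""

-- ===== PORT B =====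
-- B's loop 'for count in range(3)' with an early break: each round finds the next
-- "< " (i = -1 if absent), strips the piece before it, prepends it to result,
-- and continues on the slice after the separator.
def lfnLoop : List Int → String → String → String
  | [], _, result => result
  | count :: counts, rest, result =>
    let i := PySem.Str.find rest "< "
    let piece := PySem.Str.strip (if i < 0 then rest else PySem.Str.slice rest none (some i))
    let result' := if count == 0 then piece else piece ++ " " ++ result
    if i < 0 then result'
    else lfnLoop counts (PySem.Str.slice rest (some (i + 2)) none) result'

def lecturer_format_name_alt (name : String) : String :=
  lfnLoop (PySem.List.pyRange 0 3 1) name ""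

-- ===== PRECONDITION & SPEC =====
def Spec_lecturer_format_name (name : String) (out : String) : Prop := out = lecturer_format_name_alt name
instance (name : String) (out : String) : Decidable (Spec_lecturer_format_name name out) := by unfold Spec_lecturer_format_name; infer_instance

-- ===== CLAIM (what is proved, stated in full; the proofs are below) =====
def Claim_equal_lecturer_format_name : Prop := ∀ (name : String), Dom_lecturer_format_name name → Spec_lecturer_format_name name (lecturer_format_name name)

-- ===== LEMMAS AND PROOFS =====

-- reference characterisation of splitting at "< " by first occurrence (Chars.find)
def sref (l : List Char) : List (List Char) :=
  let i := PySem.Chars.find l ['<', ' ']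
  if 0 ≤ i then l.take i.toNat :: sref (l.drop (i.toNat + 2))
  else [l]
termination_by l.length
decreasing_by
  have hinf : ['<', ' '] <:+: l := (PySem.Chars.find_nonneg_iff _ _).mp (by assumption)
  have := hinf.length_le
  simp only [List.length_drop]
  simp at this
  omega

lemma sref_ne_nil (l : List Char) : sref l ≠ [] := by
  rw [sref]
  split <;> simp

lemma sref_length_pos (l : List Char) : 0 < (sref l).length :=
  List.length_pos_of_ne_nil (sref_ne_nil l)

lemma find_of_prefix {l : List Char} (h : ['<', ' '] <+: l) :
    PySem.Chars.find l ['<', ' '] = 0 := by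
  have h0 : 0 ≤ PySem.Chars.find l ['<', ' '] :=
    (PySem.Chars.find_nonneg_iff _ _).mpr h.isInfix
  obtain ⟨-, hmin⟩ := PySem.Chars.find_spec h0
  by_contra hne
  have hpos : 0 < (PySem.Chars.find l ['<', ' ']).toNat := by omega
  exact hmin 0 hpos (by simpa using h)

lemma find_cons {c : Char} {rest : List Char} (h : ¬ ['<', ' '] <+: (c :: rest)) :
    PySem.Chars.find (c :: rest) ['<', ' '] =
      if PySem.Chars.find rest ['<', ' '] < 0 then -1
      else PySem.Chars.find rest ['<', ' '] + 1 := by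
  have hdrop : ∀ j, (c :: rest).drop (j + 1) = rest.drop j := fun j => rfl
  split
  · -- no occurrence in rest → none in c :: rest
    rename_i hlt
    have hrest : ¬ ['<', ' '] <:+: rest := by
      have := PySem.Chars.neg_one_le_find rest ['<', ' ']
      exact (PySem.Chars.find_eq_neg_one_iff _ _).mp (by omega)
    rw [PySem.Chars.find_eq_neg_one_iff]
    intro hinf
    obtain ⟨j, hj⟩ := (PySem.Chars.exists_prefix_drop_iff_isIn _ _).mpr
      ((PySem.Chars.isIn_iff_infix _ _).mpr hinf)
    cases j with
    | zero => exact h (by simpa using hj)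
    | succ j =>
      exact hrest ((PySem.Chars.isIn_iff_infix _ _).mp
        ((PySem.Chars.exists_prefix_drop_iff_isIn _ _).mp ⟨j, by rwa [hdrop] at hj⟩))
  · rename_i hge
    have hj' : 0 ≤ PySem.Chars.find rest ['<', ' '] := by omega
    obtain ⟨hocc, hmin⟩ := PySem.Chars.find_spec hj'
    set j' := (PySem.Chars.find rest ['<', ' ']).toNat with hj'def
    -- c :: rest contains the pattern at j' + 1
    have hinf : ['<', ' '] <:+: (c :: rest) :=
      (PySem.Chars.isIn_iff_infix _ _).mp
        ((PySem.Chars.exists_prefix_drop_iff_isIn _ _).mp ⟨j' + 1, by rwa [hdrop]⟩)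
    have h0 : 0 ≤ PySem.Chars.find (c :: rest) ['<', ' '] :=
      (PySem.Chars.find_nonneg_iff _ _).mpr hinf
    obtain ⟨hocc2, hmin2⟩ := PySem.Chars.find_spec h0
    set j := (PySem.Chars.find (c :: rest) ['<', ' ']).toNat with hjdef
    have hjne : j ≠ 0 := by
      intro h0'
      exact h (by simpa [h0'] using hocc2)
    -- j - 1 is an occurrence in rest, so j' ≤ j - 1
    have h1 : j' ≤ j - 1 := by
      by_contra hcon
      exact hmin (j - 1) (by omega) (by rwa [← hdrop, Nat.sub_add_cancel (by omega)])
    -- j' + 1 is an occurrence in c :: rest, so j ≤ j' + 1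
    have h2 : j ≤ j' + 1 := by
      by_contra hcon
      exact hmin2 (j' + 1) (by omega) (by rwa [hdrop])
    omega

-- the fuelled accumulator loop inside PySem's splitOn computes sref
lemma go_eq : ∀ n (l cur : List Char) (acc : List (List Char)) (fuel : Nat), l.length = n → l.length < fuel →
    PySem.Chars.splitOn.go ['<', ' '] fuel l cur acc =
      acc.reverse ++ (cur.reverse ++ (sref l).headI) :: (sref l).tail := by
  intro n
  induction n using Nat.strong_induction_on with
  | _ n ih =>
    intro l cur acc fuel hlen hfuel
    match fuel, l with
    | 0, l => omega
    | fuel + 1, [] =>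
      rw [PySem.Chars.splitOn.go]
      have : sref [] = [[]] := by
        rw [sref]
        have : PySem.Chars.find [] ['<', ' '] = -1 := by decide
        simp [this]
      simp [this]
      omega
    | fuel + 1, c :: rest =>
      simp only [List.length_cons] at hlen hfuel
      rw [PySem.Chars.splitOn.go]
      by_cases hp : ['<', ' '].isPrefixOf (c :: rest)
      · have hpre : ['<', ' '] <+: (c :: rest) := List.isPrefixOf_iff_prefix.mp hp
        have hlen2 : 2 ≤ rest.length + 1 := by simpa using hpre.length_le
        have hfind : PySem.Chars.find (c :: rest) ['<', ' '] = 0 := find_of_prefix hpre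
        have hsref : sref (c :: rest) = [] :: sref ((c :: rest).drop 2) := by
          rw [sref]; simp [hfind]
        rw [if_pos hp]
        have hsl : ['<', ' '].length = 2 := rfl
        rw [hsl]
        rw [ih ((c :: rest).drop 2).length (by simp; omega) _ _ _ fuel rfl
            (by simp; omega)]
        simp [hsref]
        obtain ⟨p, ps, hps⟩ := List.exists_cons_of_ne_nil (sref_ne_nil rest.tail)
        simp [hps]
      · have hnp : ¬ ['<', ' '] <+: (c :: rest) := fun h => hp (List.isPrefixOf_iff_prefix.mpr h)
        rw [if_neg (by simpa using hp)]
        rw [ih rest.length (by omega) _ _ _ fuel rfl (by omega)]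
        have hfc := find_cons hnp
        by_cases hneg : PySem.Chars.find rest ['<', ' '] < 0
        · have hr : sref rest = [rest] := by rw [sref]; simp; omega
          have hl : sref (c :: rest) = [c :: rest] := by
            rw [sref]; rw [hfc]; simp [hneg]
          simp [hr, hl]
        · have hge : 0 ≤ PySem.Chars.find rest ['<', ' '] := by omega
          set j' := (PySem.Chars.find rest ['<', ' ']).toNat with hj'
          have hr : sref rest = rest.take j' :: sref (rest.drop (j' + 2)) := by
            rw [sref]; simp [hge, ← hj']
          have htn : (PySem.Chars.find rest ['<', ' '] + 1).toNat = j' + 1 := by omega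
          have hl : sref (c :: rest) = (c :: rest.take j') :: sref (rest.drop (j' + 2)) := by
            rw [sref]; rw [hfc]
            simp only [if_neg hneg]
            rw [if_pos (by omega), htn]
            rfl
          obtain ⟨p, ps, hps⟩ := List.exists_cons_of_ne_nil (sref_ne_nil (rest.drop (j' + 2)))
          simp [hr, hl, hps]

lemma splitOn_eq_sref (l : List Char) : PySem.Chars.splitOn l ['<', ' '] = sref l := by
  obtain ⟨p, ps, hps⟩ := List.exists_cons_of_ne_nil (sref_ne_nil l)
  rw [PySem.Chars.splitOn, go_eq l.length l [] [] (l.length + 1) rfl (by omega)]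
  simp [hps]

lemma sref_neg {l : List Char} (h : PySem.Chars.find l ['<', ' '] < 0) :
    sref l = [l] := by
  rw [sref]; simp; omega

lemma sref_pos {l : List Char} (h : 0 ≤ PySem.Chars.find l ['<', ' ']) :
    sref l = l.take (PySem.Chars.find l ['<', ' ']).toNat ::
      sref (l.drop ((PySem.Chars.find l ['<', ' ']).toNat + 2)) := by
  rw [sref]; simp [h]

lemma partsA (name : String) :
    (PySem.Str.split? name "< ").getD [] = (sref name.toList).map String.ofList := by
  have hsep : ("< " : String).toList = ['<', ' '] := by decide
  unfold PySem.Str.split? PySem.Chars.split?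
  simp [hsep, splitOn_eq_sref]

-- ===== VERDICT (by name: the statement is the Claim_ definition above) =====
theorem lecturer_format_name_spec : Claim_equal_lecturer_format_name := by
  intro name _
  unfold Spec_lecturer_format_name lecturer_format_name lecturer_format_name_alt
  have hsep : ("< " : String).toList = ['<', ' '] := by decide
  rw [partsA, show PySem.List.pyRange 0 3 1 = [0, 1, 2] from by decide]
  obtain ⟨i0, hI0⟩ : ∃ i, PySem.Chars.find name.toList ['<', ' '] = i := ⟨_, rfl⟩
  rcases lt_or_ge i0 0 with h0 | h0
  · -- no separator at all: one part
    have hs : sref name.toList = [name.toList] := sref_neg (hI0 ▸ h0)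
    apply String.toList_injective
    simp [lfnLoop, hsep, hI0, h0, hs]
  · -- at least one separator
    have hn0 : ¬ i0 < 0 := by omega
    have hs0 : sref name.toList =
        name.toList.take i0.toNat :: sref (name.toList.drop (i0.toNat + 2)) := by
      have h := sref_pos (l := name.toList) (by rw [hI0]; exact h0)
      rwa [hI0] at h
    have htk0 : PySem.List.slice name.toList none (some i0) = name.toList.take i0.toNat :=
      PySem.List.slice_to _ (by omega : (0 : Int) ≤ i0)
    have hsl1 : PySem.List.slice name.toList (some (i0 + 2)) none =
        name.toList.drop (i0.toNat + 2) := by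
      rw [PySem.List.slice_from _ (by omega : (0 : Int) ≤ i0 + 2)]
      congr 1
      omega
    obtain ⟨i1, hI1⟩ : ∃ i, PySem.Chars.find (name.toList.drop (i0.toNat + 2)) ['<', ' '] = i :=
      ⟨_, rfl⟩
    rcases lt_or_ge i1 0 with h1 | h1
    · -- exactly two parts
      have hs1 : sref (name.toList.drop (i0.toNat + 2)) = [name.toList.drop (i0.toNat + 2)] :=
        sref_neg (hI1 ▸ h1)
      apply String.toList_injective
      simp [lfnLoop, hsep, hI0, hI1, hsl1, htk0, hn0, h1, hs0, hs1]
    · -- three or more parts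
      have hn1 : ¬ i1 < 0 := by omega
      have hs1 : sref (name.toList.drop (i0.toNat + 2)) =
          (name.toList.drop (i0.toNat + 2)).take i1.toNat ::
            sref (name.toList.drop (i0.toNat + 2 + (i1.toNat + 2))) := by
        have h := sref_pos (l := name.toList.drop (i0.toNat + 2)) (by rw [hI1]; exact h1)
        rw [hI1] at h
        rw [h]
        simp
      have htk1 : PySem.List.slice (name.toList.drop (i0.toNat + 2)) none (some i1) =
          (name.toList.drop (i0.toNat + 2)).take i1.toNat :=
        PySem.List.slice_to _ (by omega : (0 : Int) ≤ i1)
      have hsl2 : PySem.List.slice (name.toList.drop (i0.toNat + 2)) (some (i1 + 2)) none =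
          name.toList.drop (i0.toNat + 2 + (i1.toNat + 2)) := by
        rw [PySem.List.slice_from _ (by omega : (0 : Int) ≤ i1 + 2),
          show (i1 + 2).toNat = i1.toNat + 2 from by omega]
        simp
      obtain ⟨i2, hI2⟩ :
          ∃ i, PySem.Chars.find (name.toList.drop (i0.toNat + 2 + (i1.toNat + 2)))
            ['<', ' '] = i := ⟨_, rfl⟩
      rcases lt_or_ge i2 0 with h2 | h2
      · -- exactly three parts
        have hs2 : sref (name.toList.drop (i0.toNat + 2 + (i1.toNat + 2))) =
            [name.toList.drop (i0.toNat + 2 + (i1.toNat + 2))] := sref_neg (hI2 ▸ h2)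
        apply String.toList_injective
        simp [lfnLoop, hsep, hI0, hI1, hI2, hsl1, hsl2, htk0, htk1, hn0, hn1, h2, hs0, hs1, hs2]
      · -- more than three parts: everything beyond the third is dropped
        have hn2 : ¬ i2 < 0 := by omega
        have hs2 : sref (name.toList.drop (i0.toNat + 2 + (i1.toNat + 2))) =
            (name.toList.drop (i0.toNat + 2 + (i1.toNat + 2))).take i2.toNat ::
              sref ((name.toList.drop (i0.toNat + 2 + (i1.toNat + 2))).drop
                (i2.toNat + 2)) := by
          have h := sref_pos (l := name.toList.drop (i0.toNat + 2 + (i1.toNat + 2)))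
            (by rw [hI2]; exact h2)
          rwa [hI2] at h
        have htk2 : PySem.List.slice (name.toList.drop (i0.toNat + 2 + (i1.toNat + 2)))
            none (some i2) =
            (name.toList.drop (i0.toNat + 2 + (i1.toNat + 2))).take i2.toNat :=
          PySem.List.slice_to _ (by omega : (0 : Int) ≤ i2)
        apply String.toList_injective
        simp [lfnLoop, hsep, hI0, hI1, hI2, hsl1, hsl2, htk0, htk1, htk2, hn0, hn1, hn2,
          hs0, hs1, hs2, sref_length_pos]
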